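-- pv_equiv track=rewrite | github.com/dauncle2026/ComfyUI-DALab | src/utils/utils.py | pingpong_video_padding
-- ===== SOURCE A (Python) =====
-- def pingpong_video_padding(array, target_len):
--     if len(array) == 1:
--         return [array[0]] * target_len
--
--     idx = 0
--     flip = False
--     target_array = []
--     while len(target_array) < target_len:
--         target_array.append(array[idx])
--         if flip:
--             idx -= 1
--         else:
--             idx += 1
--         if idx == 0 or idx == len(array) - 1:
--             flip = not flip
--     return target_array[:target_len]
-- ===== SOURCE B (Python) =====
-- def pingpong_video_padding(array, target_len):
--     if len(array) == 1:
--         return [array[0]] * target_len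
--     period = 2 * (len(array) - 1)
--     result = []
--     for i in range(target_len):
--         m = i % period
--         result.append(array[m if m < len(array) else period - m])
--     return result
-- ===== Notes on version B (the rewrite author's own statement) =====
-- stated objective: simpler
-- what changed: Replaces the stateful flip/direction bounce loop with a stateless closed-form modular index (m = i % (2*(len-1)), mirrored past the end) looked up per output position.
import Mathlib
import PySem

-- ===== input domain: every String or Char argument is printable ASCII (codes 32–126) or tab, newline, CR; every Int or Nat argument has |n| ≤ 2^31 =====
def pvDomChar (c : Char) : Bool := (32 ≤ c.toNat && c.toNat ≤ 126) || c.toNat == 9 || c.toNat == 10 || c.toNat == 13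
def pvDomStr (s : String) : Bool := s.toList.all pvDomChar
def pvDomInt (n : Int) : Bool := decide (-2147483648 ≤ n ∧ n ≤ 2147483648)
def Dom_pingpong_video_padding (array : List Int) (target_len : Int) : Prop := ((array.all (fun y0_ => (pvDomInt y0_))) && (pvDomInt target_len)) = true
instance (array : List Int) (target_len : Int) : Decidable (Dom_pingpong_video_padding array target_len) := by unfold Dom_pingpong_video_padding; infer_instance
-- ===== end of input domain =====

-- B replaces A's stateful flip/direction bounce with a stateless closed-form modular index (simpler); return value only.

-- ===== PORT A =====
-- A's while loop: each iteration appends exactly one element, so it runs exactly max(target_len, 0) times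
def pvA_loop (array : List Int) : Nat → Int → Bool → List Int → List Int
  | 0, _, _, acc => acc
  | fuel+1, idx, flip, acc =>
    let acc' := acc ++ [PySem.List.pyGetD array idx 0]
    let idx' := if flip then idx - 1 else idx + 1
    let flip' := if idx' == 0 || idx' == (array.length : Int) - 1 then !flip else flip
    pvA_loop array fuel idx' flip' acc'

def pingpong_video_padding (array : List Int) (target_len : Int) : List Int :=
  if array.length == 1 then
    List.replicate target_len.toNat (PySem.List.pyGetD array 0 0)
  else
    PySem.List.slice (pvA_loop array target_len.toNat 0 false []) none (some target_len)

-- ===== PORT B =====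
def pingpong_video_padding_alt (array : List Int) (target_len : Int) : List Int :=
  if array.length == 1 then
    List.replicate target_len.toNat (PySem.List.pyGetD array 0 0)
  else
    let period : Int := 2 * ((array.length : Int) - 1)
    (PySem.List.pyRange 0 target_len 1).map (fun i =>
      let m := PySem.Int.mod i period
      PySem.List.pyGetD array (if m < (array.length : Int) then m else period - m) 0)

-- ===== PRECONDITION & SPEC =====
-- Pre_ excludes only array = [] with target_len ≥ 1, where Python A raises IndexError (B raises there too).
def Pre_pingpong_video_padding (array : List Int) (target_len : Int) : Prop :=
  array ≠ [] ∨ target_len ≤ 0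
instance (array : List Int) (target_len : Int) : Decidable (Pre_pingpong_video_padding array target_len) := by
  unfold Pre_pingpong_video_padding; infer_instance
def pvWitness_pingpong_video_padding : List Int × Int := ([3, 1, 4], 8)

def Spec_pingpong_video_padding (array : List Int) (target_len : Int) (out : List Int) : Prop := out = pingpong_video_padding_alt array target_len
instance (array : List Int) (target_len : Int) (out : List Int) : Decidable (Spec_pingpong_video_padding array target_len out) := by unfold Spec_pingpong_video_padding; infer_instance

-- ===== CLAIM (what is proved, stated in full; the proofs are below) =====
def Claim_equal_pingpong_video_padding : Prop := ∀ (array : List Int) (target_len : Int), Dom_pingpong_video_padding array target_len → Pre_pingpong_video_padding array target_len → Spec_pingpong_video_padding array target_len (pingpong_video_padding array target_len)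

-- ===== LEMMAS AND PROOFS =====

-- closed-form state of A's loop just before it produces element i (n = array length, n ≥ 2)
def pvIdx (n i : Nat) : Nat :=
  if i % (2*(n-1)) < n then i % (2*(n-1)) else 2*(n-1) - i % (2*(n-1))
def pvFlip (n i : Nat) : Bool := decide (n - 1 ≤ i % (2*(n-1)))

lemma pv_mod_succ (n i : Nat) (hn : 2 ≤ n) :
    (i+1) % (2*(n-1)) = if i % (2*(n-1)) + 1 = 2*(n-1) then 0 else i % (2*(n-1)) + 1 := by
  have hp : 0 < 2*(n-1) := by omega
  have hm : i % (2*(n-1)) < 2*(n-1) := Nat.mod_lt _ hp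
  have h1 : 1 % (2*(n-1)) = 1 := Nat.mod_eq_of_lt (by omega)
  rw [Nat.add_mod, h1]
  by_cases he : i % (2*(n-1)) + 1 = 2*(n-1)
  · rw [if_pos he, he, Nat.mod_self]
  · rw [if_neg he, Nat.mod_eq_of_lt (by omega)]

lemma pv_idx_step (n i : Nat) (hn : 2 ≤ n) :
    (if pvFlip n i then ((pvIdx n i : Int)) - 1 else ((pvIdx n i : Int)) + 1)
      = (pvIdx n (i+1) : Int) := by
  have hp : 0 < 2*(n-1) := by omega
  unfold pvIdx pvFlip
  set m := i % (2*(n-1)) with hmdef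
  set m2 := (i+1) % (2*(n-1)) with hm2def
  have hm : m < 2*(n-1) := Nat.mod_lt _ hp
  have hs : m2 = if m + 1 = 2*(n-1) then 0 else m + 1 := pv_mod_succ n i hn
  by_cases h1 : m + 1 = 2*(n-1) <;> simp only [h1, if_pos, if_false] at hs <;>
    simp only [decide_eq_true_eq] <;> split_ifs <;> omega

lemma pv_flip_step (n i : Nat) (hn : 2 ≤ n) :
    (if (pvIdx n (i+1) : Int) == 0 || (pvIdx n (i+1) : Int) == (n : Int) - 1
      then !(pvFlip n i) else pvFlip n i) = pvFlip n (i+1) := by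
  have hp : 0 < 2*(n-1) := by omega
  unfold pvIdx pvFlip
  set m := i % (2*(n-1)) with hmdef
  set m2 := (i+1) % (2*(n-1)) with hm2def
  have hm : m < 2*(n-1) := Nat.mod_lt _ hp
  have hm2 : m2 < 2*(n-1) := Nat.mod_lt _ hp
  have hs : m2 = if m + 1 = 2*(n-1) then 0 else m + 1 := pv_mod_succ n i hn
  by_cases h1 : m + 1 = 2*(n-1) <;> simp only [h1, if_pos, if_false] at hs <;>
    simp only [beq_iff_eq, Bool.or_eq_true] <;> split_ifs <;>
    simp only [← decide_not, decide_eq_decide] <;> omega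

lemma pv_loop_eq (array : List Int) (hn : 2 ≤ array.length) :
    ∀ (fuel i : Nat) (acc : List Int),
      pvA_loop array fuel ((pvIdx array.length i : Nat) : Int) (pvFlip array.length i) acc
        = acc ++ (List.range fuel).map
            (fun j => PySem.List.pyGetD array ((pvIdx array.length (i+j) : Nat) : Int) 0) := by
  intro fuel
  induction fuel with
  | zero => intro i acc; simp [pvA_loop]
  | succ fuel ih =>
    intro i acc
    simp only [pvA_loop]
    rw [pv_idx_step array.length i hn, pv_flip_step array.length i hn, ih (i+1)]
    rw [List.range_succ_eq_map, List.map_cons, List.map_map]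
    simp [Function.comp_def, Nat.add_comm, Nat.add_left_comm]

-- ===== VERDICT (by name: the statement is the Claim_ definition above) =====
theorem pingpong_video_padding_spec : Claim_equal_pingpong_video_padding := by
  unfold Claim_equal_pingpong_video_padding Spec_pingpong_video_padding Pre_pingpong_video_padding
  intro array target_len _ hpre
  unfold pingpong_video_padding pingpong_video_padding_alt
  by_cases h1 : array.length = 1
  · simp [h1]
  · rw [if_neg (by simpa using h1), if_neg (by simpa using h1)]
    by_cases htl : target_len ≤ 0
    · have h0 : target_len.toNat = 0 := by omega
      rw [h0, PySem.List.pyRange_one_eq_nil (by omega)]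
      simp [pvA_loop, PySem.List.slice]
    · have hne : array ≠ [] := by
        rcases hpre with h | h
        · exact h
        · omega
      have hn : 2 ≤ array.length := by
        have := List.length_pos_iff.mpr hne
        omega
      have h0i : ((pvIdx array.length 0 : Nat) : Int) = 0 := by
        unfold pvIdx; rw [Nat.zero_mod, if_pos (by omega : 0 < array.length)]; rfl
      have h0f : pvFlip array.length 0 = false := by
        unfold pvFlip; simp only [Nat.zero_mod, decide_eq_false_iff_not]; omega
      have hloop := pv_loop_eq array hn target_len.toNat 0 []
      rw [h0i, h0f] at hloop
      rw [hloop]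
      have ht : target_len = ((target_len.toNat : Nat) : Int) := (Int.toNat_of_nonneg (by omega)).symm
      rw [ht, PySem.List.slice_to_natCast, PySem.List.pyRange_one]
      rw [List.take_of_length_le (by simp)]
      simp only [List.map_map, List.nil_append]
      apply List.map_congr_left
      intro k hk
      simp only [Function.comp_def, zero_add]
      have hcast : (2*((array.length:Int)-1)) = ((2*(array.length-1) : Nat) : Int) := by
        push_cast [Nat.cast_sub (by omega : 1 ≤ array.length)]; ring
      rw [hcast, PySem.Int.mod_natCast]
      have hm : k % (2*(array.length-1)) < 2*(array.length-1) := Nat.mod_lt _ (by omega)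
      congr 1
      simp only [pvIdx]
      split_ifs <;> omega
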